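-- pv_equiv track=rewrite | github.com/zhuny/Codejam | solution/H/HS/MoonsAndUmbrellas/__main__.py | edge_min_cost
-- ===== SOURCE A (Python) =====
-- def edge_min_cost(x, y, width, char):
--     if char == 'J':
--         x, y = y, x
--     min_cost = 0
--     cost = 0
--     for i in range(1, width):
--         cost += x
--         min_cost = min(cost, min_cost)
--         x, y = y, x
--     return min_cost
-- ===== SOURCE B (Python) =====
-- def edge_min_cost(x, y, width, char):
--     # Closed-form minimum prefix sum of the alternating sequence x, y, x, y, ...
--     if char == 'J':
--         x, y = y, x
--     n = width - 1          # number of terms added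
--     if n <= 0:
--         return 0
--     s = x + y
--     if s >= 0:
--         # prefix sums never drift downward overall: min is 0 or the first term
--         return min(0, x)
--     # s < 0: each full pair lowers the sum by s; minimum is at the tail
--     return min((n // 2) * s, ((n - 1) // 2) * s + x)
-- ===== Notes on version B (the rewrite author's own statement) =====
-- stated objective: faster
-- what changed: Replaced the O(width) loop over alternating additions by an O(1) closed-form case analysis on the sign of x+y for the minimum prefix sum.
import Mathlib
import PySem

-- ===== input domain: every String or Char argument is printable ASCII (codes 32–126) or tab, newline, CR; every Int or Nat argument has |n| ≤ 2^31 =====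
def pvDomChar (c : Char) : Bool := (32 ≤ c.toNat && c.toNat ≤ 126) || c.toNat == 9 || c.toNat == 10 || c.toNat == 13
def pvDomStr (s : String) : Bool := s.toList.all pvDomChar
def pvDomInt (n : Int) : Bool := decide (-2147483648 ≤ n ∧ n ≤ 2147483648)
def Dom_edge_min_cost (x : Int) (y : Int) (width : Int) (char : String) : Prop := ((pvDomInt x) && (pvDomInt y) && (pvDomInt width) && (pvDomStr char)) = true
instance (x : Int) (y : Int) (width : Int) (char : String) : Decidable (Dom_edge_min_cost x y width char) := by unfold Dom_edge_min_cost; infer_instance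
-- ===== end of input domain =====

-- B replaces A's O(width) alternating loop by an O(1) closed-form case analysis on sign(x+y).

-- ===== PORT A =====
-- literal port of A's loop: state (x, y, cost, min_cost), one step per element of range(1, width)
def edge_min_cost (x : Int) (y : Int) (width : Int) (char : String) : Int :=
  let p : Int × Int := if char == "J" then (y, x) else (x, y)
  let st : Int × Int × Int × Int :=
    (PySem.List.pyRange 1 width 1).foldl
      (fun st _ =>
        let cost := st.2.2.1 + st.1
        (st.2.1, st.1, cost, min cost st.2.2.2))
      (p.1, p.2, 0, 0)
  st.2.2.2

-- ===== PORT B =====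
def edge_min_cost_alt (x : Int) (y : Int) (width : Int) (char : String) : Int :=
  let p : Int × Int := if char == "J" then (y, x) else (x, y)
  let x := p.1
  let y := p.2
  let n := width - 1
  if n ≤ 0 then 0
  else
    let s := x + y
    if s ≥ 0 then min 0 x
    else min (PySem.Int.floordiv n 2 * s) (PySem.Int.floordiv (n - 1) 2 * s + x)

-- ===== PRECONDITION & SPEC =====
def Spec_edge_min_cost (x : Int) (y : Int) (width : Int) (char : String) (out : Int) : Prop := out = edge_min_cost_alt x y width char
instance (x : Int) (y : Int) (width : Int) (char : String) (out : Int) : Decidable (Spec_edge_min_cost x y width char out) := by unfold Spec_edge_min_cost; infer_instance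

-- ===== CLAIM (what is proved, stated in full; the proofs are below) =====
def Claim_equal_edge_min_cost : Prop := ∀ (x : Int) (y : Int) (width : Int) (char : String), Dom_edge_min_cost x y width char → Spec_edge_min_cost x y width char (edge_min_cost x y width char)

-- ===== LEMMAS AND PROOFS =====

-- the loop body of A, iterated n times
def pvStep (st : Int × Int × Int × Int) : Int × Int × Int × Int :=
  let cost := st.2.2.1 + st.1
  (st.2.1, st.1, cost, min cost st.2.2.2)

def pvLoop : Nat → (Int × Int × Int × Int) → (Int × Int × Int × Int)
  | 0, st => st
  | n + 1, st => pvLoop n (pvStep st)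

-- min over k = 1..n of the k-th prefix sum of x, y, x, y, …
def pvQ : Nat → Int → Int → Int
  | 0, _, _ => 0
  | n + 1, x, y => min x (x + pvQ n y x)

theorem pvLoop_eq_foldl (l : List Int) (st : Int × Int × Int × Int) :
    l.foldl (fun st _ =>
        let cost := st.2.2.1 + st.1
        (st.2.1, st.1, cost, min cost st.2.2.2)) st = pvLoop l.length st := by
  induction l generalizing st with
  | nil => rfl
  | cons a t ih => simpa [pvLoop, pvStep] using ih (pvStep st)

theorem pvLoop_min (n : Nat) (x y c m : Int) :
    (pvLoop (n + 1) (x, y, c, m)).2.2.2 = min m (c + pvQ (n + 1) x y) := by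
  induction n generalizing x y c m with
  | zero => simp [pvLoop, pvStep, pvQ]; omega
  | succ n ih =>
    show (pvLoop (n + 1) (pvStep (x, y, c, m))).2.2.2 = _
    rw [show pvStep (x, y, c, m) = (y, x, c + x, min (c + x) m) from rfl, ih]
    simp only [pvQ]
    omega

theorem pvQ_two_step (n : Nat) (x y : Int) :
    pvQ (n + 2) x y = min x (min (x + y) (x + y + pvQ n x y)) := by
  simp only [pvQ]; omega

-- closed form of min 0 (pvQ n x y) for n ≥ 1
def pvF (n : Nat) (x y : Int) : Int :=
  if x + y ≥ 0 then min 0 x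
  else min ((n / 2 : Nat) * (x + y)) (((n - 1) / 2 : Nat) * (x + y) + x)

theorem pvQ_closed (n : Nat) (x y : Int) :
    min 0 (pvQ (n + 1) x y) = pvF (n + 1) x y ∧
    min 0 (pvQ (n + 2) x y) = pvF (n + 2) x y := by
  induction n with
  | zero =>
    constructor
    · simp only [pvQ, pvF]
      split_ifs <;> simp_all
    · simp only [pvQ, pvF]
      split_ifs <;> simp_all <;> omega
  | succ n ih =>
    refine ⟨ih.2, ?_⟩
    rw [pvQ_two_step]
    have h1 := ih.1
    simp only [pvF] at h1 ⊢
    split_ifs at h1 ⊢ with hs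
    · omega
    · -- s < 0 case: divisions step by one when n grows by 2
      have e1 : ((n + 3) / 2 : Nat) = (n + 1) / 2 + 1 := by omega
      have e2 : ((n + 3 - 1) / 2 : Nat) = (n + 1 - 1) / 2 + 1 := by omega
      rw [e1, e2, Nat.cast_add, Nat.cast_add, Nat.cast_one, add_mul, add_mul, one_mul]
      have hA : ((((n + 1) / 2 : Nat) : Int)) * (x + y) ≤ 0 := by
        apply mul_nonpos_of_nonneg_of_nonpos <;> omega
      have hB : ((((n + 1 - 1) / 2 : Nat) : Int)) * (x + y) ≤ 0 := by
        apply mul_nonpos_of_nonneg_of_nonpos <;> omega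
      generalize (((((n + 1) / 2 : Nat)) : Int)) * (x + y) = A at *
      generalize (((((n + 1 - 1) / 2 : Nat)) : Int)) * (x + y) = B at *
      generalize pvQ (n + 1) x y = q at *
      omega

theorem edge_alt_eval (x y : Int) (width : Int) (hw : 1 ≤ width - 1) :
    (if (width - 1) ≤ 0 then (0 : Int)
     else if x + y ≥ 0 then min 0 x
     else min (PySem.Int.floordiv (width - 1) 2 * (x + y))
              (PySem.Int.floordiv (width - 1 - 1) 2 * (x + y) + x))
    = pvF (width - 1).toNat x y := by
  have hn : ¬ (width - 1 ≤ 0) := by omega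
  set k : Nat := (width - 1).toNat with hk
  have hk1 : 1 ≤ k := by omega
  have hwk : width - 1 = (k : Int) := by omega
  have hwk1 : (k : Int) - 1 = ((k - 1 : Nat) : Int) := by omega
  have hd1 : PySem.Int.floordiv (k : Int) 2 = ((k / 2 : Nat) : Int) := by
    exact_mod_cast PySem.Int.floordiv_natCast k 2
  have hd2 : PySem.Int.floordiv ((k - 1 : Nat) : Int) 2 = (((k - 1) / 2 : Nat) : Int) := by
    exact_mod_cast PySem.Int.floordiv_natCast (k - 1) 2
  simp only [hn, if_false, pvF]
  rw [hwk, hwk1, hd1, hd2]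

-- core equality, after the char swap has been resolved to (x, y)
theorem pv_core (x y : Int) (width : Int) :
    (pvLoop (PySem.List.pyRange 1 width 1).length (x, y, 0, 0)).2.2.2
    = (if (width - 1) ≤ 0 then (0 : Int)
       else if x + y ≥ 0 then min 0 x
       else min (PySem.Int.floordiv (width - 1) 2 * (x + y))
                (PySem.Int.floordiv (width - 1 - 1) 2 * (x + y) + x)) := by
  rw [PySem.List.length_pyRange_one]
  by_cases hw : width - 1 ≤ 0
  · have : (width - 1).toNat = 0 := by omega
    simp [this, pvLoop, hw]
  · have hw1 : 1 ≤ width - 1 := by omega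
    rw [edge_alt_eval x y width hw1]
    obtain ⟨m, hm⟩ : ∃ m : Nat, (width - 1).toNat = m + 1 := ⟨(width - 1).toNat - 1, by omega⟩
    rw [hm, pvLoop_min]
    have := (pvQ_closed m x y).1
    simpa using this

-- ===== VERDICT (by name: the statement is the Claim_ definition above) =====
theorem edge_min_cost_spec : Claim_equal_edge_min_cost := by
  intro x y width char _
  show edge_min_cost x y width char = edge_min_cost_alt x y width char
  unfold edge_min_cost edge_min_cost_alt
  by_cases hc : char == "J" <;>
    simp only [hc, if_true, Bool.false_eq_true, if_false] <;>
    rw [pvLoop_eq_foldl, pv_core]
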